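-- pv_equiv track=rewrite | github.com/sefran12/the-garden-of-forking-paths | adapter/adapter.py | _extract_narrative_pairs
-- ===== SOURCE A (Python) =====
-- from typing import Dict, List, Optional, Any, Tuple
--
-- def _extract_narrative_pairs(chat_messages: List[Dict[str, str]], max_scenes: int) -> Tuple[List[str], List[str]]:
--     """
--     Extract user actions and scene responses as pairs, limited to max_scenes.
--     Returns (actions, scenes) tuple.
--     """
--     # Skip only the welcome message
--     messages = [msg for msg in chat_messages[1:]]  # Keep initial scene
--
--     # Group into pairs of (user_action, scene_response)
--     pairs = []
--     current_pair = []
--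
--     for msg in messages:
--         current_pair.append(msg["content"])
--         if len(current_pair) == 2:  # We have a complete pair
--             pairs.append(tuple(current_pair))
--             current_pair = []
--
--     # Take only the last max_scenes pairs
--     pairs = pairs[-max_scenes:] if len(pairs) > max_scenes else pairs
--
--     # Unzip pairs into separate lists
--     actions, scenes = zip(*pairs) if pairs else ([], [])
--     return list(actions), list(scenes)
-- ===== SOURCE B (Python) =====
-- def _extract_narrative_pairs(chat_messages, max_scenes):
--     """
--     Extract user actions and scene responses as pairs, limited to max_scenes.
--     Returns (actions, scenes) tuple.
--     """
--     # Contents after the welcome message; actions at even offsets, scenes at odd.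
--     contents = [m["content"] for m in chat_messages[1:]]
--     scenes = contents[1::2]
--     actions = contents[0::2][:len(scenes)]  # drop a dangling final action
--     if len(scenes) > max_scenes:
--         actions = actions[-max_scenes:]
--         scenes = scenes[-max_scenes:]
--     return actions, scenes
-- ===== Notes on version B (the rewrite author's own statement) =====
-- stated objective: simpler
-- what changed: Replaces A's buffered pair-accumulating loop plus zip(*pairs) unzip with direct strided slicing of the content list (evens = actions, odds = scenes) truncated and tail-sliced componentwise; no pair tuples are ever formed.
import Mathlib
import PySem

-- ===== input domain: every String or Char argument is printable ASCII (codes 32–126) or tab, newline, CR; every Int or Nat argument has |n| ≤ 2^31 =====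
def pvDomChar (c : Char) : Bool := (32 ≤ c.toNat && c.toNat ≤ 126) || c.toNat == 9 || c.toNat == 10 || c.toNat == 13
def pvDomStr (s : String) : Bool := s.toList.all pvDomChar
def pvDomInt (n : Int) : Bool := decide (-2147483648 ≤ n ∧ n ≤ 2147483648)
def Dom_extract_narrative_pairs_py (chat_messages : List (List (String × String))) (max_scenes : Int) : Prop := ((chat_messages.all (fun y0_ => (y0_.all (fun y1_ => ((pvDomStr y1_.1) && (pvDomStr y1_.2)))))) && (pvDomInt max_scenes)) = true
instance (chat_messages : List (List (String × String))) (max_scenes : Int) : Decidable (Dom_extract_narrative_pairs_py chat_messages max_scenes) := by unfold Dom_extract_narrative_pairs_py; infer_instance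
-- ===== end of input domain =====

-- B replaces A's buffered pair-accumulating loop + zip(*pairs) unzip with strided slicing of the
-- content list (simpler decomposition; no pair tuples are formed); same return value wherever A returns.

-- ===== PORT A =====
-- msg["content"]: first-match lookup in the association list (KeyError when absent is excluded by
-- Pre_; under Pre_ the default "" is never used)
def pvContent (msg : List (String × String)) : String :=
  ((msg.find? (fun kv => kv.1 == "content")).map (fun kv => kv.2)).getD ""

-- A's loop body: current_pair.append(msg["content"]); if len == 2 (the [a, b] shape), flush the pair
def pvStepA (st : List (String × String) × List String) (msg : List (String × String)) :
    List (String × String) × List String :=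
  match st.2 ++ [pvContent msg] with
  | [a, b] => (st.1 ++ [(a, b)], [])
  | cur => (st.1, cur)

def extract_narrative_pairs_py (chat_messages : List (List (String × String))) (max_scenes : Int) : List String × List String :=
  -- messages = chat_messages[1:]
  let messages := PySem.List.slice chat_messages (some 1) none
  let st := messages.foldl pvStepA ([], [])
  let pairs := st.1
  -- pairs = pairs[-max_scenes:] if len(pairs) > max_scenes else pairs
  let pairs := if (pairs.length : Int) > max_scenes then PySem.List.slice pairs (some (-max_scenes)) none else pairs
  -- actions, scenes = zip(*pairs) if pairs else ([], []); return list(actions), list(scenes)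
  if pairs = [] then ([], [])
  else (pairs.map Prod.fst, pairs.map Prod.snd)

-- ===== PORT B =====
def extract_narrative_pairs_py_alt (chat_messages : List (List (String × String))) (max_scenes : Int) : List String × List String :=
  -- contents = [m["content"] for m in chat_messages[1:]]
  let contents := (PySem.List.slice chat_messages (some 1) none).map pvContent
  -- scenes = contents[1::2]  (step 2 ≠ 0, so slice? never returns none)
  let scenes := (PySem.List.slice? contents (some 1) none 2).getD []
  -- actions = contents[0::2][:len(scenes)]
  let actions := PySem.List.slice ((PySem.List.slice? contents none none 2).getD []) none (some (scenes.length : Int))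
  if (scenes.length : Int) > max_scenes then
    (PySem.List.slice actions (some (-max_scenes)) none,
     PySem.List.slice scenes (some (-max_scenes)) none)
  else (actions, scenes)

-- ===== PRECONDITION & SPEC =====
-- Pre_ excludes exactly the inputs on which A raises KeyError: a message after the first
-- without a "content" key (B raises there too).
def Pre_extract_narrative_pairs_py (chat_messages : List (List (String × String))) (max_scenes : Int) : Prop :=
  ∀ msg ∈ chat_messages.drop 1, "content" ∈ msg.map Prod.fst
instance (chat_messages : List (List (String × String))) (max_scenes : Int) : Decidable (Pre_extract_narrative_pairs_py chat_messages max_scenes) := by unfold Pre_extract_narrative_pairs_py; infer_instance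

def pvWitness_extract_narrative_pairs_py : (List (List (String × String))) × Int :=
  ([[("role", "assistant"), ("content", "welcome")],
    [("role", "user"), ("content", "go north")],
    [("role", "assistant"), ("content", "a cave")]], 2)

def Spec_extract_narrative_pairs_py (chat_messages : List (List (String × String))) (max_scenes : Int) (out : List String × List String) : Prop := out = extract_narrative_pairs_py_alt chat_messages max_scenes
instance (chat_messages : List (List (String × String))) (max_scenes : Int) (out : List String × List String) : Decidable (Spec_extract_narrative_pairs_py chat_messages max_scenes out) := by unfold Spec_extract_narrative_pairs_py; infer_instance

-- ===== CLAIM (what is proved, stated in full; the proofs are below) =====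
def Claim_equal_extract_narrative_pairs_py : Prop := ∀ (chat_messages : List (List (String × String))) (max_scenes : Int), Dom_extract_narrative_pairs_py chat_messages max_scenes → Pre_extract_narrative_pairs_py chat_messages max_scenes → Spec_extract_narrative_pairs_py chat_messages max_scenes (extract_narrative_pairs_py chat_messages max_scenes)

-- ===== LEMMAS AND PROOFS =====

-- elements at even / odd offsets (proof-side characterisations of the two strided slices)
def pvEvens {α : Type} : List α → List α
  | [] => []
  | [a] => [a]
  | a :: _ :: r => a :: pvEvens r

def pvOdds {α : Type} : List α → List α
  | [] => []
  | [_] => []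
  | _ :: b :: r => b :: pvOdds r

-- A's complete pairs (proof-side characterisation of A's loop)
def pvPairs {α : Type} : List α → List (α × α)
  | [] => []
  | [_] => []
  | a :: b :: r => (a, b) :: pvPairs r

theorem pvPairs_fst {α : Type} (c : List α) :
    (pvPairs c).map Prod.fst = (pvEvens c).take (pvOdds c).length := by
  induction c using pvPairs.induct with
  | case1 => simp [pvPairs, pvEvens, pvOdds]
  | case2 a => simp [pvPairs, pvEvens, pvOdds]
  | case3 a b r ih => simp [pvPairs, pvEvens, pvOdds, ih]

theorem pvPairs_snd {α : Type} (c : List α) :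
    (pvPairs c).map Prod.snd = pvOdds c := by
  induction c using pvPairs.induct with
  | case1 => simp [pvPairs, pvOdds]
  | case2 a => simp [pvPairs, pvOdds]
  | case3 a b r ih => simp [pvPairs, pvOdds, ih]

theorem pvPairs_length {α : Type} (c : List α) :
    (pvPairs c).length = (pvOdds c).length := by
  induction c using pvPairs.induct with
  | case1 => simp [pvPairs, pvOdds]
  | case2 a => simp [pvPairs, pvOdds]
  | case3 a b r ih => simp [pvPairs, pvOdds, ih]

theorem pvOdds_le_pvEvens {α : Type} (c : List α) :
    (pvOdds c).length ≤ (pvEvens c).length := by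
  induction c using pvPairs.induct with
  | case1 => simp [pvEvens, pvOdds]
  | case2 a => simp [pvEvens, pvOdds]
  | case3 a b r ih => simpa [pvEvens, pvOdds] using ih

theorem pvEvens_odds_cons {α : Type} (t : List α) :
    ∀ a : α, pvEvens (a :: t) = a :: pvOdds t ∧ pvOdds (a :: t) = pvEvens t := by
  induction t using pvPairs.induct with
  | case1 => intro a; simp [pvEvens, pvOdds]
  | case2 b => intro a; simp [pvEvens, pvOdds]
  | case3 b c r ih =>
    intro a
    constructor
    · show pvEvens (a :: b :: c :: r) = a :: pvOdds (b :: c :: r)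
      simp [pvEvens, pvOdds, (ih c).1]
    · show pvOdds (a :: b :: c :: r) = pvEvens (b :: c :: r)
      simp [pvEvens, pvOdds, (ih c).2]

-- A's loop over the messages produces exactly the complete pairs of the contents
theorem loopA (msgs : List (List (String × String))) (acc : List (String × String)) :
    (msgs.foldl pvStepA (acc, [])).1 = acc ++ pvPairs (msgs.map pvContent) := by
  induction msgs using pvPairs.induct generalizing acc with
  | case1 => simp [pvPairs]
  | case2 m => simp [pvPairs, pvStepA]
  | case3 m1 m2 r ih => simp [pvPairs, pvStepA, List.foldl_cons, ih]

-- the Nat-indexed core of both strided slices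
theorem pvFilterMap_evens {α : Type} (xs : List α) :
    List.filterMap (fun x : Nat => xs[(2 * (x : Int)).toNat]?) (List.range ((xs.length + 1) / 2))
      = pvEvens xs := by
  induction xs using pvPairs.induct with
  | case1 => simp [pvEvens]
  | case2 a => simp [pvEvens, List.range_succ]
  | case3 a b r ih =>
    have hlen : (((a :: b :: r).length + 1) / 2) = (r.length + 1) / 2 + 1 := by
      simp; omega
    rw [hlen, List.range_succ_eq_map]
    simp only [List.filterMap_cons, List.filterMap_map]
    have hf : (fun x : Nat => (a :: b :: r)[(2 * ((x : Nat) : Int)).toNat]?) ∘ (fun i => i + 1)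
        = (fun x : Nat => r[(2 * (x : Int)).toNat]?) := by
      funext x
      have h1 : (2 * (((x + 1 : Nat) : Int))).toNat = (2 * (x : Int)).toNat + 1 + 1 := by omega
      simp only [Function.comp_apply, h1]
      simp
    rw [hf]
    simp [pvEvens, ih]

-- contents[0::2] is pvEvens
theorem slice?_step2 {α : Type} (xs : List α) :
    PySem.List.slice? xs none none 2 = some (pvEvens xs) := by
  simp only [PySem.List.slice?, PySem.List.sliceIndices]
  norm_num
  have hc : (if 0 < xs.length then (((xs.length : Int) + 2 - 1) / 2).toNat else 0)
      = (xs.length + 1) / 2 := by split <;> omega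
  rw [hc, pvFilterMap_evens]

-- contents[1::2] is pvOdds
theorem slice?_one_step2 {α : Type} (xs : List α) :
    PySem.List.slice? xs (some 1) none 2 = some (pvOdds xs) := by
  simp only [PySem.List.slice?, PySem.List.sliceIndices]
  norm_num
  cases xs with
  | nil => simp [pvOdds]
  | cons a t =>
    have h1 : min 1 (((a :: t).length : Int)) = 1 := by simp only [List.length_cons]; omega
    rw [h1]
    have hc : (if 1 < (a :: t).length then ((((a :: t).length : Int) - 1 + 2 - 1) / 2).toNat else 0)
        = (t.length + 1) / 2 := by simp; split <;> omega
    rw [hc]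
    have hf : (fun x : Nat => (a :: t)[((1 : Int) + 2 * (x : Int)).toNat]?)
        = (fun x : Nat => t[(2 * (x : Int)).toNat]?) := by
      funext x
      have h2 : ((1 : Int) + 2 * (x : Int)).toNat = (2 * (x : Int)).toNat + 1 := by omega
      rw [h2, List.getElem?_cons_succ]
    rw [hf, pvFilterMap_evens, (pvEvens_odds_cons t a).2]

-- values agree on every input (A's 'if pairs' unzip equals the componentwise maps even when empty)
theorem main_eq (chat_messages : List (List (String × String))) (max_scenes : Int) :
    extract_narrative_pairs_py chat_messages max_scenes
      = extract_narrative_pairs_py_alt chat_messages max_scenes := by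
  simp only [extract_narrative_pairs_py, extract_narrative_pairs_py_alt]
  rw [loopA, slice?_step2, slice?_one_step2]
  simp only [Option.getD_some, List.nil_append]
  set c := (PySem.List.slice chat_messages (some 1) none).map pvContent with hc
  have hfst := pvPairs_fst c
  have hsnd := pvPairs_snd c
  have hlen := pvPairs_length c
  have hle := pvOdds_le_pvEvens c
  have hact : PySem.List.slice (pvEvens c) none (some (((pvOdds c).length : Nat) : Int))
      = (pvEvens c).take (pvOdds c).length := PySem.List.slice_to_natCast _ _
  rw [hact, hlen]
  have hif : ∀ Q : List (String × String),
      (if Q = [] then (([] : List String), ([] : List String))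
        else (Q.map Prod.fst, Q.map Prod.snd)) = (Q.map Prod.fst, Q.map Prod.snd) := by
    intro Q; split <;> simp_all
  by_cases h : max_scenes < ((pvOdds c).length : Int)
  · simp only [gt_iff_lt, if_pos h]
    rw [hif, PySem.List.slice_some_none, PySem.List.slice_some_none, PySem.List.slice_some_none,
      hlen]
    have htk : (List.take (pvOdds c).length (pvEvens c)).length = (pvOdds c).length := by
      rw [List.length_take]; omega
    rw [htk, List.map_drop, List.map_drop, hfst, hsnd]
  · simp only [gt_iff_lt, if_neg h]
    rw [hif, hfst, hsnd]

-- ===== VERDICT (by name: the statement is the Claim_ definition above) =====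
theorem extract_narrative_pairs_py_spec : Claim_equal_extract_narrative_pairs_py := by
  intro cm ms _ _
  exact main_eq cm ms
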